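-- pv_equiv track=rewrite | github.com/Akbari06/StoryGrow | src/agents/illustrator.py | _create_fallback_prompt
-- ===== SOURCE A (Python) =====
-- def _create_fallback_prompt(scene_text: str) -> str:
--     """Create fallback image prompt"""
--     # Extract key elements from scene text
--     scene_lower = scene_text.lower()
--
--     # Determine setting
--     setting = "magical forest"
--     if any(word in scene_lower for word in ['park', 'playground']):
--         setting = "sunny park"
--     elif any(word in scene_lower for word in ['home', 'house', 'room']):
--         setting = "cozy home"
--     elif any(word in scene_lower for word in ['school', 'classroom']):
--         setting = "bright classroom"
--     elif any(word in scene_lower for word in ['beach', 'ocean', 'sea']):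
--         setting = "beautiful beach"
--
--     # Determine characters
--     characters = "a happy child"
--     if any(word in scene_lower for word in ['unicorn', 'horse']):
--         characters = "a child with a magical unicorn"
--     elif any(word in scene_lower for word in ['dragon']):
--         characters = "a child with a friendly dragon"
--     elif any(word in scene_lower for word in ['friend', 'friends']):
--         characters = "children playing together"
--
--     return f"Children's book illustration: {characters} in a {setting}. {scene_text[:50]}... Bright watercolor style, warm colors, child-friendly, whimsical and magical atmosphere."
-- ===== SOURCE B (Python) =====
-- # One left-to-right positional scan collects the set of matched keywords
-- # (naive multi-pattern matcher via str.startswith), then each category is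
-- # classified from that hit set by priority; no per-keyword substring searches.
--
-- _KEYWORDS = ['park', 'playground', 'home', 'house', 'room',
--              'school', 'classroom', 'beach', 'ocean', 'sea',
--              'unicorn', 'horse', 'dragon', 'friend', 'friends']
--
-- _SETTINGS = [
--     (['park', 'playground'], "sunny park"),
--     (['home', 'house', 'room'], "cozy home"),
--     (['school', 'classroom'], "bright classroom"),
--     (['beach', 'ocean', 'sea'], "beautiful beach"),
-- ]
--
-- _CHARACTERS = [
--     (['unicorn', 'horse'], "a child with a magical unicorn"),
--     (['dragon'], "a child with a friendly dragon"),
--     (['friend', 'friends'], "children playing together"),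
-- ]
--
-- def _classify(groups, default, hits):
--     for words, label in groups:
--         if any(w in hits for w in words):
--             return label
--     return default
--
-- def _create_fallback_prompt(scene_text: str) -> str:
--     """Create fallback image prompt"""
--     t = scene_text.lower()
--     hits = set()
--     for i in range(len(t)):
--         for w in _KEYWORDS:
--             if t.startswith(w, i):
--                 hits.add(w)
--     setting = _classify(_SETTINGS, "magical forest", hits)
--     characters = _classify(_CHARACTERS, "a happy child", hits)
--     return f"Children's book illustration: {characters} in a {setting}. {scene_text[:50]}... Bright watercolor style, warm colors, child-friendly, whimsical and magical atmosphere."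
-- ===== Notes on version B (the rewrite author's own statement) =====
-- stated objective: alternative
-- what changed: Instead of running a substring search per keyword inside two if/elif chains, B makes one positional scan of the lowered text that collects the set of all matched keywords (a naive multi-pattern matcher), and then classifies setting and characters from that hit set by group priority.
import Mathlib
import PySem

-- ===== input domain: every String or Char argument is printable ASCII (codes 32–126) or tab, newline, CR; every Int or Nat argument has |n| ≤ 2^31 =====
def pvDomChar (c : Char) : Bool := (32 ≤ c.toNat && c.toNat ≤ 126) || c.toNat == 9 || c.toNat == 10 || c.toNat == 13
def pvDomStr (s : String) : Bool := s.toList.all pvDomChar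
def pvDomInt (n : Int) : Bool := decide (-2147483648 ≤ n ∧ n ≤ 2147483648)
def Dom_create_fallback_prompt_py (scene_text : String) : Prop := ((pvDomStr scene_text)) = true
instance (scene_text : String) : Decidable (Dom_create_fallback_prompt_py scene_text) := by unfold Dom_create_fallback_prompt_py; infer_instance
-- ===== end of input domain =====

-- B replaces A's per-keyword substring tests (two if/elif chains) by one positional scan
-- that collects the set of matched keywords, then classifies from that hit set
-- (alternative algorithm; same output for every input).


-- ===== PORT A =====
def create_fallback_prompt_py (scene_text : String) : String :=
  let scene_lower := PySem.Str.lower scene_text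
  let setting :=
    if ["park", "playground"].any (fun w => PySem.Str.isIn w scene_lower) then "sunny park"
    else if ["home", "house", "room"].any (fun w => PySem.Str.isIn w scene_lower) then "cozy home"
    else if ["school", "classroom"].any (fun w => PySem.Str.isIn w scene_lower) then "bright classroom"
    else if ["beach", "ocean", "sea"].any (fun w => PySem.Str.isIn w scene_lower) then "beautiful beach"
    else "magical forest"
  let characters :=
    if ["unicorn", "horse"].any (fun w => PySem.Str.isIn w scene_lower) then "a child with a magical unicorn"
    else if ["dragon"].any (fun w => PySem.Str.isIn w scene_lower) then "a child with a friendly dragon"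
    else if ["friend", "friends"].any (fun w => PySem.Str.isIn w scene_lower) then "children playing together"
    else "a happy child"
  "Children's book illustration: " ++ characters ++ " in a " ++ setting ++ ". "
    ++ PySem.Str.slice scene_text none (some 50)
    ++ "... Bright watercolor style, warm colors, child-friendly, whimsical and magical atmosphere."

-- ===== PORT B =====
def pvKeywords : List (List Char) :=
  ["park".toList, "playground".toList, "home".toList, "house".toList, "room".toList,
   "school".toList, "classroom".toList, "beach".toList, "ocean".toList, "sea".toList,
   "unicorn".toList, "horse".toList, "dragon".toList, "friend".toList, "friends".toList]

def pvSettings : List (List (List Char) × String) :=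
  [(["park".toList, "playground".toList], "sunny park"),
   (["home".toList, "house".toList, "room".toList], "cozy home"),
   (["school".toList, "classroom".toList], "bright classroom"),
   (["beach".toList, "ocean".toList, "sea".toList], "beautiful beach")]

def pvCharacters : List (List (List Char) × String) :=
  [(["unicorn".toList, "horse".toList], "a child with a magical unicorn"),
   (["dragon".toList], "a child with a friendly dragon"),
   (["friend".toList, "friends".toList], "children playing together")]

-- one positional scan: t.startswith(w, i) is Chars.startswith (t.drop i) w
def pvHits (t : List Char) : PySem.Set (List Char) :=
  (List.range t.length).foldl
    (fun h i => pvKeywords.foldl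
      (fun h w => if PySem.Chars.startswith (t.drop i) w then PySem.Set.add h w else h) h)
    PySem.Set.empty

-- first group whose some word is in the hit set, else the default
def pvClassify (groups : List (List (List Char) × String)) (default : String)
    (hits : PySem.Set (List Char)) : String :=
  match groups with
  | [] => default
  | (words, label) :: rest =>
      if words.any (fun w => PySem.Set.contains hits w) then label
      else pvClassify rest default hits

def create_fallback_prompt_py_alt (scene_text : String) : String :=
  let t := (PySem.Str.lower scene_text).toList
  let hits := pvHits t
  let setting := pvClassify pvSettings "magical forest" hits
  let characters := pvClassify pvCharacters "a happy child" hits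
  "Children's book illustration: " ++ characters ++ " in a " ++ setting ++ ". "
    ++ PySem.Str.slice scene_text none (some 50)
    ++ "... Bright watercolor style, warm colors, child-friendly, whimsical and magical atmosphere."

-- ===== PRECONDITION & SPEC =====
def Spec_create_fallback_prompt_py (scene_text : String) (out : String) : Prop := out = create_fallback_prompt_py_alt scene_text
instance (scene_text : String) (out : String) : Decidable (Spec_create_fallback_prompt_py scene_text out) := by unfold Spec_create_fallback_prompt_py; infer_instance

-- ===== CLAIM (what is proved, stated in full; the proofs are below) =====
def Claim_equal_create_fallback_prompt_py : Prop := ∀ (scene_text : String), Dom_create_fallback_prompt_py scene_text → Spec_create_fallback_prompt_py scene_text (create_fallback_prompt_py scene_text)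

-- ===== LEMMAS AND PROOFS =====

-- membership after one pass of the inner keyword loop at a fixed position
theorem pv_mem_inner (ws : List (List Char)) (h : PySem.Set (List Char))
    (p : List Char → Bool) (w : List Char) :
    w ∈ ws.foldl (fun h w => if p w then PySem.Set.add h w else h) h ↔
      w ∈ h ∨ (w ∈ ws ∧ p w = true) := by
  induction ws generalizing h with
  | nil => simp
  | cons x xs ih =>
      simp only [List.foldl_cons, ih]
      by_cases hp : p x
      · simp [hp, PySem.Set.mem_add]
        constructor
        · rintro ((hw | rfl) | ⟨hmem, hpw⟩)
          · exact Or.inl hw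
          · exact Or.inr ⟨Or.inl rfl, hp⟩
          · exact Or.inr ⟨Or.inr hmem, hpw⟩
        · rintro (hw | ⟨(rfl | hmem), hpw⟩)
          · exact Or.inl (Or.inl hw)
          · exact Or.inl (Or.inr rfl)
          · exact Or.inr ⟨hmem, hpw⟩
      · simp [hp]
        constructor
        · rintro (hw | ⟨hmem, hpw⟩)
          · exact Or.inl hw
          · exact Or.inr ⟨Or.inr hmem, hpw⟩
        · rintro (hw | ⟨(rfl | hmem), hpw⟩)
          · exact Or.inl hw
          · exact absurd hpw (by simp [hp])
          · exact Or.inr ⟨hmem, hpw⟩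

-- membership in the full positional scan
theorem pv_mem_scan (l : List Nat) (t : List Char) (h : PySem.Set (List Char)) (w : List Char) :
    w ∈ l.foldl
        (fun h i => pvKeywords.foldl
          (fun h w => if PySem.Chars.startswith (t.drop i) w then PySem.Set.add h w else h) h)
        h ↔
      w ∈ h ∨ (w ∈ pvKeywords ∧ ∃ i ∈ l, PySem.Chars.startswith (t.drop i) w = true) := by
  induction l generalizing h with
  | nil => simp
  | cons i is ih =>
      simp only [List.foldl_cons, ih, pv_mem_inner]
      constructor
      · rintro ((hw | ⟨hk, hs⟩) | ⟨hk, j, hj, hs⟩)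
        · exact Or.inl hw
        · exact Or.inr ⟨hk, i, by simp, hs⟩
        · exact Or.inr ⟨hk, j, by simp [hj], hs⟩
      · rintro (hw | ⟨hk, j, hj, hs⟩)
        · exact Or.inl (Or.inl hw)
        · rcases List.mem_cons.mp hj with rfl | hj
          · exact Or.inl (Or.inr ⟨hk, hs⟩)
          · exact Or.inr ⟨hk, j, hj, hs⟩

-- for a nonempty keyword, being hit by the scan is exactly substring membership
theorem pv_contains_hits (t : List Char) (w : List Char)
    (hk : w ∈ pvKeywords) (hne : w ≠ []) :
    PySem.Set.contains (pvHits t) w = PySem.Chars.isIn w t := by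
  have hmem : w ∈ pvHits t ↔ PySem.Chars.isIn w t = true := by
    unfold pvHits
    rw [pv_mem_scan]
    rw [← PySem.Chars.exists_prefix_drop_iff_isIn]
    constructor
    · rintro (hw | ⟨_, i, _, hs⟩)
      · simp [PySem.Set.empty] at hw
      · exact ⟨i, (PySem.Chars.startswith_iff _ _).mp hs⟩
    · rintro ⟨j, hj⟩
      refine Or.inr ⟨hk, ?_⟩
      have hjlt : j < t.length := by
        by_contra hge
        rw [List.drop_eq_nil_of_le (Nat.le_of_not_lt hge)] at hj
        exact hne (List.prefix_nil.mp hj)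
      exact ⟨j, List.mem_range.mpr hjlt, (PySem.Chars.startswith_iff _ _).mpr hj⟩
  by_cases hin : PySem.Chars.isIn w t = true
  · rw [hin, (PySem.Set.contains_iff _ _).mpr (hmem.mpr hin)]
  · rw [Bool.not_eq_true] at hin
    rw [hin, ← Bool.not_eq_true]
    intro hc
    have hw := hmem.mp ((PySem.Set.contains_iff _ _).mp hc)
    rw [hin] at hw
    exact Bool.false_ne_true hw

-- ===== VERDICT (by name: the statement is the Claim_ definition above) =====
theorem create_fallback_prompt_py_spec : Claim_equal_create_fallback_prompt_py := by
  intro s _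
  unfold Spec_create_fallback_prompt_py create_fallback_prompt_py create_fallback_prompt_py_alt
  simp only [pvClassify, pvSettings, pvCharacters, List.any_cons, List.any_nil, Bool.or_false]
  rw [pv_contains_hits _ _ (by decide) (by decide),
      pv_contains_hits _ _ (by decide) (by decide),
      pv_contains_hits _ _ (by decide) (by decide),
      pv_contains_hits _ _ (by decide) (by decide),
      pv_contains_hits _ _ (by decide) (by decide),
      pv_contains_hits _ _ (by decide) (by decide),
      pv_contains_hits _ _ (by decide) (by decide),
      pv_contains_hits _ _ (by decide) (by decide),
      pv_contains_hits _ _ (by decide) (by decide),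
      pv_contains_hits _ _ (by decide) (by decide),
      pv_contains_hits _ _ (by decide) (by decide),
      pv_contains_hits _ _ (by decide) (by decide),
      pv_contains_hits _ _ (by decide) (by decide),
      pv_contains_hits _ _ (by decide) (by decide),
      pv_contains_hits _ _ (by decide) (by decide)]
  simp [PySem.Str.isIn_eq]
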